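-- pv_equiv track=rewrite | github.com/fredehur/CRQ-APP | tools/scenario_mapper.py | score_scenarios
-- ===== SOURCE A (Python) =====
-- def score_scenarios(text, master):
--     """Score each scenario by keyword matches in signal text."""
--     scores = {}
--     for name, scenario in master.items():
--         score = 0
--         # Use all string fields in the scenario as keyword sources
--         for value in scenario.values():
--             if isinstance(value, str):
--                 words = [w.lower() for w in value.split() if len(w) > 4]
--                 for word in words:
--                     if word in text:
--                         score += 1
--         # Also check incident_type words directly
--         for word in name.lower().split():
--             if len(word) > 3 and word in text:
--                 score += 2
--         scores[name] = score
--     return scores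
-- ===== SOURCE B (Python) =====
-- def score_scenarios(text, master):
--     """Score each scenario by keyword matches in signal text.
--
--     Inverted-index strategy: collect every weighted keyword occurrence into an
--     index word -> [(scenario_name, weight), ...], then test each DISTINCT word
--     against the text exactly once and fan its contributions out to the scores.
--     """
--     scores = {name: 0 for name in master}
--     index = {}
--     for name, scenario in master.items():
--         for value in scenario.values():
--             if isinstance(value, str):
--                 for w in value.split():
--                     if len(w) > 4:
--                         index.setdefault(w.lower(), []).append((name, 1))
--         for w in name.lower().split():
--             if len(w) > 3:
--                 index.setdefault(w, []).append((name, 2))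
--     for word, contribs in index.items():
--         if word in text:
--             for name, wt in contribs:
--                 scores[name] += wt
--     return scores
-- ===== Notes on version B (the rewrite author's own statement) =====
-- stated objective: alternative
-- what changed: B inverts the traversal: it builds an inverted index word -> [(scenario_name, weight)] over all scenarios, then performs one substring test per DISTINCT word and fans the weighted contributions out to pre-initialized scores, instead of A's per-scenario per-occurrence membership tests.
import Mathlib
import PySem

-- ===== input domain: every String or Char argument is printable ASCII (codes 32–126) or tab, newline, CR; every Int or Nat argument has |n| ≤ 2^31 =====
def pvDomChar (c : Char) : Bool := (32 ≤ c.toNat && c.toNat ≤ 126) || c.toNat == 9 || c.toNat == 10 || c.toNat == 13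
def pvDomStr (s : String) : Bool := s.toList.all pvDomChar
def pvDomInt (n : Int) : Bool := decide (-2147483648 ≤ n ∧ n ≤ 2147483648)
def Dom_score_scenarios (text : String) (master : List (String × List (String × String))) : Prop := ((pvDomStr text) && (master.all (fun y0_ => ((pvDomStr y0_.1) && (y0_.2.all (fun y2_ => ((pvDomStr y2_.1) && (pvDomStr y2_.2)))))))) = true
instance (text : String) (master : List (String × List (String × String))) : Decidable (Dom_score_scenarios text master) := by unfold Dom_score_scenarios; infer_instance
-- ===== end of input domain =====

-- B replaces A's per-scenario per-occurrence membership tests by an inverted index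
-- (word -> weighted contributions) built over all scenarios, with one substring test
-- per distinct word fanning its contributions out to the scores (objective: alternative).

-- ===== PORT A =====
-- per-entry score of A (the body of A's outer loop); isinstance(value, str) is always true at this type
def pvScoreA (text : String) (nv : String × List (String × String)) : Int :=
  let score : Int := (PySem.Dict.ofList nv.2).values.foldl (fun score value =>
      let words := ((PySem.Str.split₀ value).filter (fun w => 4 < PySem.Str.len w)).map PySem.Str.lower
      words.foldl (fun score word => if PySem.Str.isIn word text then score + 1 else score) score) 0
  (PySem.Str.split₀ (PySem.Str.lower nv.1)).foldl (fun score word =>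
      if 3 < PySem.Str.len word && PySem.Str.isIn word text then score + 2 else score) score

def score_scenarios (text : String) (master : List (String × List (String × String))) : List (String × Int) :=
  ((PySem.Dict.ofList master).items.foldl
      (fun scores nv => scores.insert nv.1 (pvScoreA text nv))
      (PySem.Dict.empty (κ := String) (ν := Int))).items

-- ===== PORT B =====
-- transliteration of Source B: init scores to zero over the master names, build the inverted
-- index by setdefault/append (= Dict.modify with default []), then one membership test
-- per distinct index word fanning out its (name, weight) contributions
def score_scenarios_alt (text : String) (master : List (String × List (String × String))) : List (String × Int) :=
  let m := PySem.Dict.ofList master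
  let scores : PySem.Dict String Int := m.keys.foldl (fun s name => s.insert name 0) PySem.Dict.empty
  let index : PySem.Dict String (List (String × Int)) := m.items.foldl (fun index nv =>
      let index := (PySem.Dict.ofList nv.2).values.foldl (fun index value =>
          (PySem.Str.split₀ value).foldl (fun index w =>
            if 4 < PySem.Str.len w then
              index.modify (PySem.Str.lower w) [] (· ++ [(nv.1, (1 : Int))])
            else index) index) index
      (PySem.Str.split₀ (PySem.Str.lower nv.1)).foldl (fun index w =>
          if 3 < PySem.Str.len w then index.modify w [] (· ++ [(nv.1, (2 : Int))]) else index) index)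
    PySem.Dict.empty
  (index.items.foldl (fun scores wc =>
      if PySem.Str.isIn wc.1 text then
        wc.2.foldl (fun scores nw => scores.insert nw.1 (scores.getD nw.1 0 + nw.2)) scores
      else scores) scores).items

-- sum over a flatten

-- ===== PRECONDITION & SPEC =====
def Spec_score_scenarios (text : String) (master : List (String × List (String × String))) (out : List (String × Int)) : Prop := out = score_scenarios_alt text master
instance (text : String) (master : List (String × List (String × String))) (out : List (String × Int)) : Decidable (Spec_score_scenarios text master out) := by unfold Spec_score_scenarios; infer_instance

-- ===== CLAIM (what is proved, stated in full; the proofs are below) =====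
def Claim_equal_score_scenarios : Prop := ∀ (text : String) (master : List (String × List (String × String))), Dom_score_scenarios text master → Spec_score_scenarios text master (score_scenarios text master)

-- ===== LEMMAS AND PROOFS =====
-- the weighted contributions (word, weight) of one scenario entry, in order
def pvK (nv : String × List (String × String)) : List (String × Int) :=
  ((((PySem.Dict.ofList nv.2).values.flatMap PySem.Str.split₀).filter
      (fun w => 4 < PySem.Str.len w)).map PySem.Str.lower).map (fun w => (w, (1 : Int)))
  ++ (((PySem.Str.split₀ (PySem.Str.lower nv.1)).filter
      (fun w => 3 < PySem.Str.len w)).map (fun w => (w, (2 : Int))))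

-- value of a contribution for the text
def pvHit (text : String) (q : String × Int) : Int := if PySem.Str.isIn q.1 text then q.2 else 0

-- a contribution tagged with its scenario name: (word, (name, weight))
def pvTag (n : String) (q : String × Int) : String × String × Int := (q.1, n, q.2)

-- the full contribution stream, in B's build order
def pvC (items : List (String × List (String × String))) : List (String × String × Int) :=
  items.flatMap (fun nv => (pvK nv).map (pvTag nv.1))

-- one contribution added to the index
def pvIdxStep (d : PySem.Dict String (List (String × Int))) (p : String × String × Int) :
    PySem.Dict String (List (String × Int)) := d.modify p.1 [] (· ++ [p.2])

-- one contribution fanned into the scores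
def pvAdd (s : PySem.Dict String Int) (q : String × Int) : PySem.Dict String Int :=
  s.insert q.1 (s.getD q.1 0 + q.2)

-- value of a tagged contribution for the text and a given scenario name
def pvGN (text n : String) (p : String × String × Int) : Int :=
  if PySem.Str.isIn p.1 text && p.2.1 == n then p.2.2 else 0

lemma pv_foldl_flatMap {α β γ : Type} (f : α → List β) (g : γ → β → γ) (l : List α) (i : γ) :
    (l.flatMap f).foldl g i = l.foldl (fun s v => (f v).foldl g s) i := by
  induction l generalizing i with
  | nil => rfl
  | cons h t ih => simp [List.foldl_append, ih]

lemma pv_sum_map_ite (p : String → Bool) (k : Int) (l : List String) :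
    (l.map (fun w => if p w then k else 0)).sum = k * (l.countP p : Int) := by
  induction l with
  | nil => simp
  | cons h t ih =>
    by_cases hp : p h
    · simp only [List.map_cons, List.sum_cons, ih, List.countP_cons, hp, if_true]
      push_cast; ring
    · simp only [List.map_cons, List.sum_cons, ih, List.countP_cons, hp,
        Bool.false_eq_true, if_false]
      push_cast; ring

lemma pv_foldl_if2 (p q : String → Bool) (l : List String) (a : Int) :
    l.foldl (fun s w => if q w && p w then s + 2 else s) a
      = a + 2 * ((l.filter q).countP p : Int) := by
  rw [PySem.List.foldl_congr_mem l (fun s w => if q w && p w then s + 2 else s)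
      (fun s w => if q w then (if p w then s + 2 else s) else s) a
      (by intro acc x _; by_cases hq : q x <;> by_cases hp : p x <;> simp [hq, hp])]
  rw [PySem.List.foldl_if_eq_foldl_filter]
  rw [PySem.List.foldl_congr_mem (l.filter q) (fun s w => if p w then s + 2 else s)
      (fun s w => s + (if p w then (2 : Int) else 0)) a
      (by intro acc x _; by_cases hp : p x <;> simp [hp])]
  rw [PySem.List.foldl_add, pv_sum_map_ite]

lemma pv_sum_contrib (text : String) (k : Int) (l : List String) :
    ((l.map (fun w => (w, k))).map (pvHit text)).sum
      = k * ((l.countP (fun w => PySem.Str.isIn w text)) : Int) := by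
  rw [List.map_map]
  have hc : (pvHit text ∘ fun w => (w, k)) = fun w => if PySem.Str.isIn w text then k else 0 := by
    funext w; simp [pvHit]
  rw [hc, pv_sum_map_ite]

lemma pv_flatMap_norm (vals : List String) (q : String → Bool) :
    vals.flatMap (fun v => ((PySem.Str.split₀ v).filter q).map PySem.Str.lower)
      = ((vals.flatMap PySem.Str.split₀).filter q).map PySem.Str.lower := by
  induction vals with
  | nil => rfl
  | cons h t ih => simp [List.filter_append, List.map_append, ih]

-- A's per-entry score is the plain sum of hit-values over the contribution list
lemma pv_scoreA_sum (text : String) (nv : String × List (String × String)) :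
    pvScoreA text nv = ((pvK nv).map (pvHit text)).sum := by
  simp only [pvScoreA, pvK, List.map_append, List.sum_append]
  rw [← pv_foldl_flatMap
      (f := fun v => ((PySem.Str.split₀ v).filter (fun w => 4 < PySem.Str.len w)).map PySem.Str.lower)
      (g := fun score word => if PySem.Str.isIn word text then score + 1 else score)]
  rw [pv_foldl_if2 (fun w => PySem.Str.isIn w text) (fun w => 3 < PySem.Str.len w)]
  rw [PySem.List.foldl_if_add_one]
  rw [pv_flatMap_norm, pv_sum_contrib, pv_sum_contrib]
  ring

-- A's result is a map over the deduplicated master entries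
lemma pv_A_items (text : String) (master : List (String × List (String × String))) :
    score_scenarios text master
      = (PySem.Dict.ofList master).items.map (fun nv => (nv.1, pvScoreA text nv)) := by
  unfold score_scenarios
  have hnd : ((PySem.Dict.ofList master).items.map (fun nv => nv.1)).Nodup := by
    simpa [PySem.Dict.keys] using PySem.Dict.nodup_keys_ofList master
  rw [PySem.Dict.items_foldl_insert_fresh _ (fun nv => nv.1) (fun nv => pvScoreA text nv) _
      (fun a _ => PySem.Dict.contains_empty (ν := Int) a.1) hnd]
  rfl

-- sum over a flattened list of lists
lemma pv_sum_flatMap {α : Type} (l : List α) (f : α → List Int) :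
    (l.flatMap f).sum = (l.map (fun a => (f a).sum)).sum := by
  simp [List.flatMap, List.sum_flatten, Function.comp_def]

-- the index-building nested loops are the fold of pvIdxStep over the contribution stream

lemma pv_fold_modify1 (n : String) (ws : List String)
    (idx : PySem.Dict String (List (String × Int))) :
    ws.foldl (fun idx w => idx.modify (PySem.Str.lower w) [] (· ++ [(n, (1 : Int))])) idx
      = (((ws.map PySem.Str.lower).map (fun w => (w, (1 : Int)))).map (pvTag n)).foldl pvIdxStep idx := by
  induction ws generalizing idx with
  | nil => rfl
  | cons h t ih => simp [pvIdxStep, pvTag, ih]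

lemma pv_fold_modify2 (n : String) (ws : List String)
    (idx : PySem.Dict String (List (String × Int))) :
    ws.foldl (fun idx w => idx.modify w [] (· ++ [(n, (2 : Int))])) idx
      = ((ws.map (fun w => (w, (2 : Int)))).map (pvTag n)).foldl pvIdxStep idx := by
  induction ws generalizing idx with
  | nil => rfl
  | cons h t ih => simp [pvIdxStep, pvTag, ih]

-- the index-building nested loops are the fold of pvIdxStep over the contribution stream
lemma pv_B_index (master : List (String × List (String × String))) :
    ((PySem.Dict.ofList master).items.foldl (fun index nv =>
      let index := (PySem.Dict.ofList nv.2).values.foldl (fun index value =>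
          (PySem.Str.split₀ value).foldl (fun index w =>
            if 4 < PySem.Str.len w then
              index.modify (PySem.Str.lower w) [] (· ++ [(nv.1, (1 : Int))])
            else index) index) index
      (PySem.Str.split₀ (PySem.Str.lower nv.1)).foldl (fun index w =>
          if 3 < PySem.Str.len w then index.modify w [] (· ++ [(nv.1, (2 : Int))]) else index) index)
      PySem.Dict.empty)
      = (pvC (PySem.Dict.ofList master).items).foldl pvIdxStep PySem.Dict.empty := by
  rw [pvC, pv_foldl_flatMap]
  refine PySem.List.foldl_congr_mem _ _ _ _ ?_
  intro idx nv _
  show _ = ((pvK nv).map (pvTag nv.1)).foldl pvIdxStep idx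
  dsimp only
  rw [pvK, List.map_append, List.foldl_append]
  -- name-token part
  rw [PySem.List.foldl_ite_eq_foldl_filter
      (p := fun w => 3 < PySem.Str.len w)
      (f := fun (idx : PySem.Dict String (List (String × Int))) w =>
        idx.modify w [] (· ++ [(nv.1, (2 : Int))]))]
  rw [pv_fold_modify2]
  congr 1
  -- field-words part
  rw [← pv_foldl_flatMap
      (f := PySem.Str.split₀)
      (g := fun (idx : PySem.Dict String (List (String × Int))) w =>
        if 4 < PySem.Str.len w then idx.modify (PySem.Str.lower w) [] (· ++ [(nv.1, (1 : Int))]) else idx)]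
  rw [PySem.List.foldl_ite_eq_foldl_filter
      (p := fun w => 4 < PySem.Str.len w)
      (f := fun (idx : PySem.Dict String (List (String × Int))) w =>
        idx.modify (PySem.Str.lower w) [] (· ++ [(nv.1, (1 : Int))]))]
  rw [pv_fold_modify1]

-- the zero-initialised scores dict

-- the zero-initialised scores dict
lemma pv_scores0_items (names : List String) (hnd : names.Nodup) :
    (names.foldl (fun s name => s.insert name 0) (PySem.Dict.empty (κ := String) (ν := Int))).items
      = names.map (fun n => (n, (0 : Int))) := by
  have := PySem.Dict.items_foldl_insert_fresh names (fun n => n) (fun _ => (0 : Int))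
      (PySem.Dict.empty (κ := String) (ν := Int))
      (fun a _ => PySem.Dict.contains_empty (ν := Int) a) (by simpa using hnd)
  simpa using this

lemma pv_getD_insert_zero (names : List String) (s : PySem.Dict String Int) (n : String)
    (h : s.getD n 0 = 0) :
    (names.foldl (fun s name => s.insert name 0) s).getD n 0 = 0 := by
  induction names generalizing s with
  | nil => exact h
  | cons x t ih =>
    refine ih _ ?_
    rw [PySem.Dict.getD_insert]
    split_ifs <;> simp [h]

-- getD after fanning a contribution list into the scores

-- getD after fanning a contribution list into the scores
lemma pv_add_getD (L : List (String × Int)) (s : PySem.Dict String Int) (n : String) :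
    (L.foldl pvAdd s).getD n 0
      = s.getD n 0 + (L.map (fun q => if q.1 == n then q.2 else 0)).sum := by
  induction L generalizing s with
  | nil => simp
  | cons q t ih =>
    rw [List.foldl_cons, ih]
    show _ = _
    rw [pvAdd, PySem.Dict.getD_insert]
    by_cases h : n = q.1
    · subst h; simp; ring
    · have : (q.1 == n) = false := by simp [Ne.symm h]
      simp [h]
      exact fun h' => absurd h'.symm h

lemma pv_add_keys (L : List (String × Int)) (s : PySem.Dict String Int)
    (h : ∀ q ∈ L, q.1 ∈ s.keys) :
    (L.foldl pvAdd s).keys = s.keys := by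
  induction L generalizing s with
  | nil => rfl
  | cons q t ih =>
    rw [List.foldl_cons]
    have hc : s.contains q.1 = true :=
      (PySem.Dict.contains_iff_mem_keys s q.1).mpr (h q (List.mem_cons_self ..))
    have hk : (pvAdd s q).keys = s.keys := PySem.Dict.keys_insert_of_contains s _ hc
    rw [ih _ (fun p hp => by rw [hk]; exact h p (List.mem_cons_of_mem _ hp)), hk]

-- the final loop over the index is a pvAdd-fold over the flattened hit groups

-- the final loop over the index is a pvAdd-fold over the flattened hit groups
lemma pv_final_fold (text : String) (items : List (String × List (String × Int)))
    (s : PySem.Dict String Int) :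
    items.foldl (fun scores wc =>
        if PySem.Str.isIn wc.1 text then
          wc.2.foldl (fun scores nw => scores.insert nw.1 (scores.getD nw.1 0 + nw.2)) scores
        else scores) s
      = (items.flatMap (fun wc => if PySem.Str.isIn wc.1 text then wc.2 else [])).foldl pvAdd s := by
  rw [pv_foldl_flatMap]
  refine PySem.List.foldl_congr_mem _ _ _ _ ?_
  intro acc wc _
  split_ifs with h <;> rfl

-- summing one matching bucket out of a nodup-keyed list

-- summing one matching bucket out of a nodup-keyed list
lemma pv_sum_single {β : Type} (l : List (String × β)) (hnd : (l.map (fun p => p.1)).Nodup)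
    (nv : String × β) (hmem : nv ∈ l) (F : String × β → Int) :
    (l.map (fun p => if p.1 == nv.1 then F p else 0)).sum = F nv := by
  induction l with
  | nil => cases hmem
  | cons x t ih =>
    rw [List.map_cons] at hnd
    rcases List.mem_cons.mp hmem with rfl | hm
    · have hnx : ∀ p ∈ t, (p.1 == nv.1) = false := by
        intro p hp
        have : p.1 ∈ t.map (fun p => p.1) := List.mem_map_of_mem hp
        have hne : nv.1 ≠ p.1 := fun h => (List.nodup_cons.mp hnd).1 (h ▸ this)
        simp [Ne.symm hne]
      have : (t.map (fun p => if p.1 == nv.1 then F p else 0)) = t.map (fun _ => (0:Int)) :=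
        List.map_congr_left (fun p hp => by rw [hnx p hp]; rfl)
      rw [List.map_cons, List.sum_cons, this]
      simp
    · have hx : (x.1 == nv.1) = false := by
        have : nv.1 ∈ t.map (fun p => p.1) := List.mem_map_of_mem hm
        have hne : x.1 ≠ nv.1 := fun h => (List.nodup_cons.mp hnd).1 (h ▸ this)
        simp [hne]
      simp only [List.map_cons, List.sum_cons, hx, Bool.false_eq_true, if_false,
        ih (List.nodup_cons.mp hnd).2 hm, zero_add]

lemma pv_onehot (ws : List String) (hnd : ws.Nodup) (x : String) (hx : x ∈ ws) (c : Int) :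
    (ws.map (fun w => if x == w then c else 0)).sum = c := by
  induction ws with
  | nil => cases hx
  | cons y u ih =>
    rcases List.mem_cons.mp hx with rfl | hm
    · have hxu : x ∉ u := (List.nodup_cons.mp hnd).1
      have hz : (u.map (fun w => if x == w then c else 0)) = u.map (fun _ => (0:Int)) :=
        List.map_congr_left (fun w hw => by
          have : x ≠ w := fun h => hxu (h ▸ hw)
          simp [this])
      rw [List.map_cons, List.sum_cons, hz]
      simp
    · have hx1 : x ≠ y := fun h => (List.nodup_cons.mp hnd).1 (h ▸ hm)
      rw [List.map_cons, List.sum_cons, if_neg (by simp [hx1]),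
        ih (List.nodup_cons.mp hnd).2 hm, zero_add]

-- regrouping: summing per distinct word over filtered buckets equals summing the stream

-- regrouping: summing per distinct word over filtered buckets equals summing the stream
lemma pv_sum_group {β : Type} (ws : List String) (hnd : ws.Nodup)
    (C : List (String × β)) (hmem : ∀ p ∈ C, p.1 ∈ ws) (G : String × β → Int) :
    (ws.map (fun w => ((C.filter (fun p => p.1 == w)).map G).sum)).sum = (C.map G).sum := by
  induction C with
  | nil => simp
  | cons p t ih =>
    have hsplit : ∀ w, (List.filter (fun q => q.1 == w) (p :: t)) =
        (if p.1 == w then [p] else []) ++ List.filter (fun q => q.1 == w) t := by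
      intro w; by_cases h : (p.1 == w) <;> simp [h]
    have : (ws.map (fun w => ((List.filter (fun q => q.1 == w) (p :: t)).map G).sum))
        = ws.map (fun w => (if p.1 == w then G p else 0)
            + ((List.filter (fun q => q.1 == w) t).map G).sum) := by
      refine List.map_congr_left (fun w _ => ?_)
      rw [hsplit w]
      by_cases h : (p.1 == w) <;> simp [h]
    rw [this, PySem.List.sum_map_add_int, ih (fun q hq => hmem q (List.mem_cons_of_mem _ hq))]
    have hone : (ws.map (fun w => if p.1 == w then G p else 0)).sum = G p :=
      pv_onehot ws hnd p.1 (hmem p (List.mem_cons_self ..)) (G p)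
    rw [hone]; simp

-- the contribution-stream sum for a scenario name picks out exactly that scenario's hits

-- the contribution-stream sum for a scenario name picks out exactly that scenario's hits
lemma pv_sum_pvC (text : String) (items : List (String × List (String × String)))
    (hnd : (items.map (fun p => p.1)).Nodup)
    (nv : String × List (String × String)) (hmem : nv ∈ items) :
    ((pvC items).map (pvGN text nv.1)).sum = ((pvK nv).map (pvHit text)).sum := by
  rw [pvC, List.map_flatMap, pv_sum_flatMap]
  have hinner : ∀ a ∈ items, (((pvK a).map (pvTag a.1)).map (pvGN text nv.1)).sum
      = (if a.1 == nv.1 then ((pvK a).map (pvHit text)).sum else 0) := by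
    intro a _
    by_cases h : (a.1 == nv.1)
    · rw [if_pos h, List.map_map]
      refine congrArg List.sum (List.map_congr_left (fun q _ => ?_))
      simp only [Function.comp_def, pvGN, pvTag, pvHit, h]
      by_cases hi : PySem.Str.isIn q.1 text <;> simp
    · rw [if_neg h, List.map_map]
      have : ((pvK a).map (pvGN text nv.1 ∘ pvTag a.1)) = (pvK a).map (fun _ => (0:Int)) :=
        List.map_congr_left (fun q _ => by
          simp only [Function.comp_def, pvGN, pvTag]
          simp [h])
      simp [this]
  rw [List.map_congr_left hinner, pv_sum_single items hnd nv hmem]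

lemma pvIdxStep_eq : pvIdxStep = fun d p => d.modify p.1 [] (· ++ [p.2]) := rfl

-- B's result: each master name paired with the whole stream's sum for that name
lemma pv_B_items (text : String) (master : List (String × List (String × String))) :
    score_scenarios_alt text master
      = (PySem.Dict.ofList master).keys.map (fun n =>
          (n, ((pvC (PySem.Dict.ofList master).items).map (pvGN text n)).sum)) := by
  unfold score_scenarios_alt
  dsimp only
  rw [pv_B_index, pv_final_fold]
  generalize hCdef : pvC (PySem.Dict.ofList master).items = C
  have hkeys : (C.foldl pvIdxStep PySem.Dict.empty).keys
      = PySem.Set.ofList (C.map (fun p => p.1)) := by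
    rw [pvIdxStep_eq]
    have := PySem.Dict.keys_foldl_modify_key C (fun p => p.1) ([] : List (String × Int))
        (fun _ p => (· ++ [p.2])) PySem.Dict.empty
    rw [PySem.Dict.keys_empty] at this
    rw [this, PySem.Set.ofList_eq_foldl]
    rfl
  have hndw : (C.foldl pvIdxStep PySem.Dict.empty).keys.Nodup := by
    rw [hkeys]; exact PySem.Set.nodup_ofList _
  have hgetD : ∀ w, (C.foldl pvIdxStep PySem.Dict.empty).getD w []
      = (C.filter (fun p => p.1 == w)).map (fun p => p.2) := by
    intro w
    rw [pvIdxStep_eq]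
    simpa using PySem.Dict.getD_foldl_modify_append C PySem.Dict.empty w
  have hitems : (C.foldl pvIdxStep PySem.Dict.empty).items
      = (C.foldl pvIdxStep PySem.Dict.empty).keys.map
          (fun w => (w, (C.foldl pvIdxStep PySem.Dict.empty).getD w [])) :=
    PySem.Dict.items_eq_map_keys _ hndw []
  have hs0items : ((PySem.Dict.ofList master).keys.foldl (fun s name => s.insert name 0)
      (PySem.Dict.empty (κ := String) (ν := Int))).items
      = (PySem.Dict.ofList master).keys.map (fun n => (n, (0 : Int))) :=
    pv_scores0_items _ (PySem.Dict.nodup_keys_ofList master)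
  have hs0keys : ((PySem.Dict.ofList master).keys.foldl (fun s name => s.insert name 0)
      (PySem.Dict.empty (κ := String) (ν := Int))).keys = (PySem.Dict.ofList master).keys := by
    show (((PySem.Dict.ofList master).keys.foldl (fun s name => s.insert name 0)
      (PySem.Dict.empty (κ := String) (ν := Int))).items.map (fun p => p.1)) = _
    rw [hs0items, List.map_map]
    simp [Function.comp_def]
  have hs0getD : ∀ n, ((PySem.Dict.ofList master).keys.foldl (fun s name => s.insert name 0)
      (PySem.Dict.empty (κ := String) (ν := Int))).getD n 0 = 0 := fun n =>
    pv_getD_insert_zero _ _ _ (by simp)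
  have hCname : ∀ p ∈ C, p.2.1 ∈ (PySem.Dict.ofList master).keys := by
    intro p hp
    rw [← hCdef] at hp
    rcases List.mem_flatMap.mp hp with ⟨nv, hnv, hpin⟩
    rcases List.mem_map.mp hpin with ⟨q, _, rfl⟩
    exact List.mem_map_of_mem hnv
  have hmemws : ∀ p ∈ C, p.1 ∈ (C.foldl pvIdxStep PySem.Dict.empty).keys := by
    intro p hp
    rw [hkeys]
    exact (PySem.Set.mem_ofList _ _).mpr (List.mem_map_of_mem hp)
  have hmemflat : ∀ q ∈ (C.foldl pvIdxStep PySem.Dict.empty).items.flatMap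
      (fun wc => if PySem.Str.isIn wc.1 text then wc.2 else []),
      q.1 ∈ ((PySem.Dict.ofList master).keys.foldl (fun s name => s.insert name 0)
        (PySem.Dict.empty (κ := String) (ν := Int))).keys := by
    intro q hq
    rcases List.mem_flatMap.mp hq with ⟨wc, hwc, hqin⟩
    have hq2 : q ∈ wc.2 := by
      by_cases h : PySem.Str.isIn wc.1 text
      · rwa [if_pos h] at hqin
      · rw [if_neg h] at hqin; cases hqin
    rw [hitems] at hwc
    rcases List.mem_map.mp hwc with ⟨w, _, rfl⟩
    rw [show ((w, (C.foldl pvIdxStep PySem.Dict.empty).getD w [])).2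
        = (C.foldl pvIdxStep PySem.Dict.empty).getD w [] from rfl, hgetD w] at hq2
    rcases List.mem_map.mp hq2 with ⟨p, hpf, rfl⟩
    rw [hs0keys]
    exact hCname p (List.mem_of_mem_filter hpf)
  have hreskeys := pv_add_keys _ _ hmemflat
  have hndres : (((C.foldl pvIdxStep PySem.Dict.empty).items.flatMap
      (fun wc => if PySem.Str.isIn wc.1 text then wc.2 else [])).foldl pvAdd
      ((PySem.Dict.ofList master).keys.foldl (fun s name => s.insert name 0)
        (PySem.Dict.empty (κ := String) (ν := Int)))).keys.Nodup := by
    rw [hreskeys, hs0keys]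
    exact PySem.Dict.nodup_keys_ofList master
  rw [PySem.Dict.items_eq_map_keys _ hndres 0, hreskeys, hs0keys]
  refine List.map_congr_left (fun n _ => ?_)
  refine congrArg (fun z => (n, z)) ?_
  rw [pv_add_getD, hs0getD, zero_add]
  rw [List.map_flatMap, pv_sum_flatMap, hitems, List.map_map]
  rw [List.map_congr_left (l := (C.foldl pvIdxStep PySem.Dict.empty).keys)
      (f := _) (g := fun w => ((C.filter (fun p => p.1 == w)).map (pvGN text n)).sum)
      (fun w _ => ?_)]
  · exact pv_sum_group _ hndw C hmemws (pvGN text n)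
  · show ((if PySem.Str.isIn w text then (C.foldl pvIdxStep PySem.Dict.empty).getD w []
        else []).map (fun q => if q.1 == n then q.2 else 0)).sum
      = ((C.filter (fun p => p.1 == w)).map (pvGN text n)).sum
    by_cases hi : PySem.Str.isIn w text
    · rw [if_pos hi, hgetD w, List.map_map]
      refine congrArg List.sum (List.map_congr_left (fun p hpf => ?_))
      have hpw : p.1 = w := eq_of_beq (List.mem_filter.mp hpf).2
      simp only [Function.comp_def, pvGN, hpw, hi, Bool.true_and]
    · rw [if_neg hi]
      symm
      have : ((C.filter (fun p => p.1 == w)).map (pvGN text n))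
          = (C.filter (fun p => p.1 == w)).map (fun _ => (0:Int)) := by
        refine List.map_congr_left (fun p hpf => ?_)
        have hpw : p.1 = w := eq_of_beq (List.mem_filter.mp hpf).2
        have hfalse : PySem.Chars.isIn p.1.toList text.toList = false := by
          rw [hpw]; simpa [PySem.Str.isIn] using hi
        simp [pvGN, PySem.Str.isIn, hfalse]
      simp [this]

-- ===== VERDICT (by name: the statement is the Claim_ definition above) =====
theorem score_scenarios_spec : Claim_equal_score_scenarios := by
  intro text master _
  unfold Spec_score_scenarios
  rw [pv_A_items, pv_B_items]
  show _ = ((PySem.Dict.ofList master).items.map (fun p => p.1)).map _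
  rw [List.map_map]
  refine List.map_congr_left (fun nv hnv => ?_)
  have hnd : ((PySem.Dict.ofList master).items.map (fun p => p.1)).Nodup := by
    simpa [PySem.Dict.keys] using PySem.Dict.nodup_keys_ofList master
  show (nv.1, pvScoreA text nv) = (nv.1, ((pvC (PySem.Dict.ofList master).items).map (pvGN text nv.1)).sum)
  rw [pv_sum_pvC text _ hnd nv hnv, pv_scoreA_sum]
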